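-- pv_equiv track=rewrite | github.com/jordan21pt/LA2 | Treinos/Introdução ao Python/apelidos.py | apelidos
-- ===== SOURCE A (Python) =====
-- def apelidos(nomes):
--
--     numApelidos = []
--
--     for nome in nomes:
--         cont = 0
--         for i in range(0, len(nome)):
--             if nome[i] == " ":
--                 cont += 1
--         numApelidos.append(cont)
--
--     tuplo = [(nomes[i], numApelidos[i]) for i in range(0, len(nomes))]
--     tuplo.sort(key = lambda t: (t[1],t[0]))
--
--     nomesOrd = []
--     for t in tuplo:
--         nomesOrd.append(t[0])
--
--     return nomesOrd
-- ===== SOURCE B (Python) =====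
-- def apelidos(nomes):
--     buckets = {}
--     for nome in nomes:
--         c = sum(1 for ch in nome if ch == " ")
--         buckets.setdefault(c, []).append(nome)
--     out = []
--     for c in sorted(buckets):
--         out += sorted(buckets[c])
--     return out
-- ===== Notes on version B (the rewrite author's own statement) =====
-- stated objective: alternative
-- what changed: Replaces A's composite-key (spaces, name) sort of an index-built tuple list by a bucket decomposition: a dict from space count to names, concatenating the alphabetically sorted buckets in ascending count order.
import Mathlib
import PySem

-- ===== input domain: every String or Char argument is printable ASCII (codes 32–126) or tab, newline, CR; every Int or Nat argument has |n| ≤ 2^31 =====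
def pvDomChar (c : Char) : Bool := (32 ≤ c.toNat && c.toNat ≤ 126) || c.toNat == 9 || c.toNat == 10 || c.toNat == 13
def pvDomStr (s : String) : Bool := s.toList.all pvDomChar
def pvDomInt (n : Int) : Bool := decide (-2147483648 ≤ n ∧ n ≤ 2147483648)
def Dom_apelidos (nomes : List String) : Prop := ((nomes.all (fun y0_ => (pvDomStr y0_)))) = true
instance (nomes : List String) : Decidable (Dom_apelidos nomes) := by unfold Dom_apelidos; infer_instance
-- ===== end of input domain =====

-- B replaces A's composite-key (spaces, name) sort of an index-built tuple list by a
-- bucket decomposition: a dict from space count to names, concatenating the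
-- alphabetically sorted buckets in ascending count order (objective: alternative).

-- ===== PORT A =====
-- the inner counting loop of A: for i in range(0, len(nome)): if nome[i] == " ": cont += 1
def apelidosCount (nome : String) : Int :=
  (PySem.List.pyRange 0 (PySem.Str.len nome)).foldl
    (fun cont i => if PySem.Str.pyGet? nome i == some ' ' then cont + 1 else cont) 0

def apelidos (nomes : List String) : List String :=
  let numApelidos : List Int :=
    nomes.foldl (fun acc nome => acc ++ [apelidosCount nome]) []
  let tuplo : List (String × Int) :=
    (PySem.List.pyRange 0 (nomes.length : Int)).map
      (fun i => (PySem.List.pyGetD nomes i "", PySem.List.pyGetD numApelidos i 0))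
  let tuploSorted := PySem.List.sorted2 tuplo (fun t => t.2) (fun t => t.1)
  tuploSorted.foldl (fun acc t => acc ++ [t.1]) []

-- ===== PORT B =====
def apelidos_alt (nomes : List String) : List String :=
  let buckets : PySem.Dict Int (List String) :=
    nomes.foldl (fun d nome =>
      let c : Int := (nome.toList.map (fun ch => if ch == ' ' then (1:Int) else 0)).sum
      d.modify c [] (fun v => v ++ [nome])) PySem.Dict.empty
  (PySem.List.sorted buckets.keys (fun x => x)).foldl
    (fun out c => out ++ PySem.List.sorted (buckets.getD c []) (fun x => x)) []

-- ===== PRECONDITION & SPEC =====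
def Spec_apelidos (nomes : List String) (out : List String) : Prop := out = apelidos_alt nomes
instance (nomes : List String) (out : List String) : Decidable (Spec_apelidos nomes out) := by unfold Spec_apelidos; infer_instance

-- ===== CLAIM (what is proved, stated in full; the proofs are below) =====
def Claim_equal_apelidos : Prop := ∀ (nomes : List String), Dom_apelidos nomes → Spec_apelidos nomes (apelidos nomes)

-- ===== LEMMAS AND PROOFS =====

-- number of spaces in a string, the quantity both programs sort by
def pvCnt (s : String) : Int := (s.toList.countP (fun ch => ch == ' ') : Nat)

-- the lexicographic (spaces, name) key both programs order the output by
def pvKey (s : String) : Lex (Int × String) := toLex (pvCnt s, s)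

theorem pvKey_injective : Function.Injective pvKey := by
  intro a b h
  have h2 := congrArg (fun x => (ofLex x).2) h
  simpa [pvKey] using h2

theorem map_getElem?_range {α : Type} (l : List α) :
    (List.range l.length).map (fun i => l[i]?) = l.map some := by
  induction l with
  | nil => simp
  | cons x t ih =>
    simp only [List.length_cons, List.range_succ_eq_map, List.map_cons, List.map_map]
    refine congrArg₂ _ rfl ?_
    simpa [Function.comp] using ih

theorem apelidosCount_eq (s : String) : apelidosCount s = pvCnt s := by
  unfold apelidosCount
  rw [PySem.Str.len_eq, PySem.List.foldl_if_add_one, PySem.List.pyRange_zero_natCast,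
    List.countP_map]
  have h1 : ((fun i => PySem.Str.pyGet? s i == some ' ') ∘ (fun k : Nat => (k : Int)))
      = ((fun o => o == some ' ') ∘ (fun k : Nat => s.toList[k]?)) := by
    funext k
    simp [PySem.Str.pyGet?, PySem.List.pyGet?_natCast]
  rw [h1, ← List.countP_map, map_getElem?_range, List.countP_map]
  simp only [pvCnt, Int.zero_add, Nat.cast_inj]
  refine List.countP_congr ?_
  intro x _
  simp

theorem altCnt_eq (s : String) :
    (s.toList.map (fun ch => if ch == ' ' then (1:Int) else 0)).sum = pvCnt s := by
  simpa [pvCnt] using PySem.List.sum_map_ite_one_zero (fun ch => ch == ' ') s.toList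

-- A's composite-key sort is the sort by the lexicographic key (count, name)
theorem sorted2_eq_sorted_lex (xs : List (String × Int)) :
    PySem.List.sorted2 xs (fun t => t.2) (fun t => t.1) =
      PySem.List.sorted xs (fun t => toLex (t.2, t.1)) := by
  unfold PySem.List.sorted2 PySem.List.sorted
  simp only
  congr 1
  funext acc x
  congr 1
  funext a b
  rcases lt_trichotomy a.2 b.2 with h | h | h
  · simp [Prod.Lex.toLex_lt_toLex, h, lt_asymm h]
  · simp [Prod.Lex.toLex_lt_toLex, h]
  · simp [Prod.Lex.toLex_lt_toLex, h, lt_asymm h, h.ne']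

-- A's index-aligned tuple list is just the list of (name, count) pairs
theorem tuplo_eq (nomes : List String) :
    (PySem.List.pyRange 0 (nomes.length : Int)).map
      (fun i => (PySem.List.pyGetD nomes i "",
        PySem.List.pyGetD (nomes.map apelidosCount) i 0)) =
      nomes.map (fun s => (s, apelidosCount s)) := by
  rw [PySem.List.pyRange_zero_natCast, List.map_map]
  apply List.ext_getElem
  · simp
  · intro i h1 h2
    simp only [List.length_map, List.length_range] at h1
    simp [PySem.List.pyGetD_natCast, List.getD_eq_getElem?_getD, h1]

-- A in closed form: map fst of the lex-sorted (name, count) pairs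
theorem apelidos_eq (nomes : List String) :
    apelidos nomes =
      (PySem.List.sorted (nomes.map (fun s => (s, pvCnt s)))
        (fun t => toLex (t.2, t.1))).map (fun t => t.1) := by
  unfold apelidos
  simp only [PySem.List.foldl_append_singleton_eq_map, List.nil_append]
  rw [tuplo_eq, sorted2_eq_sorted_lex]
  have h : (fun s => (s, apelidosCount s)) = (fun s => (s, pvCnt s)) := by
    funext s; rw [apelidosCount_eq]
  rw [h]

theorem apelidos_perm (nomes : List String) : (apelidos nomes).Perm nomes := by
  rw [apelidos_eq]
  have h := (PySem.List.sorted_perm (nomes.map (fun s => (s, pvCnt s)))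
    (fun t => toLex (t.2, t.1)) false).map (fun t : String × Int => t.1)
  refine h.trans ?_
  simp [Function.comp_def]

theorem apelidos_pairwise (nomes : List String) :
    (apelidos nomes).Pairwise (fun a b => pvKey a ≤ pvKey b) := by
  rw [apelidos_eq, List.pairwise_map]
  refine (PySem.List.sorted_pairwise (nomes.map (fun s => (s, pvCnt s)))
    (fun t => toLex (t.2, t.1))).imp_of_mem ?_
  intro a b ha hb hle
  have ha' : a.2 = pvCnt a.1 := by
    have := (PySem.List.mem_sorted _ _ _ a).mp ha
    obtain ⟨s, _, rfl⟩ := List.mem_map.mp this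
    rfl
  have hb' : b.2 = pvCnt b.1 := by
    have := (PySem.List.mem_sorted _ _ _ b).mp hb
    obtain ⟨s, _, rfl⟩ := List.mem_map.mp this
    rfl
  simpa [pvKey, ← ha', ← hb'] using hle

-- the bucket-building fold of B, on the proof-level count
def pvBuild (d : PySem.Dict Int (List String)) (l : List String) : PySem.Dict Int (List String) :=
  l.foldl (fun d nome => d.modify (pvCnt nome) [] (fun v => v ++ [nome])) d

theorem build_eq (nomes : List String) :
    nomes.foldl (fun d nome =>
      d.modify ((nome.toList.map (fun ch => if ch == ' ' then (1:Int) else 0)).sum) []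
        (fun v => v ++ [nome]))
      PySem.Dict.empty = pvBuild PySem.Dict.empty nomes := by
  unfold pvBuild
  congr 1
  funext d nome
  rw [altCnt_eq]

theorem getD_pvBuild (l : List String) :
    ∀ (d : PySem.Dict Int (List String)) (c : Int),
      (pvBuild d l).getD c [] = d.getD c [] ++ l.filter (fun s => pvCnt s == c) := by
  induction l with
  | nil => intro d c; simp [pvBuild]
  | cons x t ih =>
    intro d c
    show (pvBuild (d.modify (pvCnt x) [] (fun v => v ++ [x])) t).getD c [] = _
    rw [ih, PySem.Dict.getD_modify]
    by_cases h : c = pvCnt x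
    · simp [h]
    · have h2 : (pvCnt x == c) = false := by simpa using Ne.symm h
      simp [h, h2]

theorem keys_pvBuild (nomes : List String) :
    (pvBuild PySem.Dict.empty nomes).keys = PySem.Set.ofList (nomes.map pvCnt) := by
  unfold pvBuild
  rw [PySem.Dict.keys_foldl_modify_key nomes pvCnt []
    (fun _ nome v => v ++ [nome]) PySem.Dict.empty]
  rw [PySem.Dict.keys_empty, PySem.Set.ofList_eq_foldl]
  rfl

-- B in closed form: buckets concatenated along the sorted distinct counts
theorem apelidos_alt_eq (nomes : List String) :
    apelidos_alt nomes =
      (PySem.List.sorted (PySem.Set.ofList (nomes.map pvCnt)) (fun x => x)).flatMap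
        (fun c => PySem.List.sorted (nomes.filter (fun s => pvCnt s == c)) (fun x => x)) := by
  unfold apelidos_alt
  simp only
  rw [build_eq, keys_pvBuild, PySem.List.foldl_append_eq_flatMap, List.nil_append]
  have hb : (fun c => PySem.List.sorted ((pvBuild PySem.Dict.empty nomes).getD c []) (fun x => x))
      = (fun c => PySem.List.sorted (nomes.filter (fun s => pvCnt s == c)) (fun x => x)) := by
    funext c
    rw [getD_pvBuild]
    simp [PySem.Dict.getD, PySem.Dict.get?, PySem.Dict.empty]
  rw [hb]

-- concatenating the buckets of the distinct counts is a rearrangement of the input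
theorem flat_perm : ∀ (cs : List Int), cs.Nodup → ∀ (l : List String),
    (∀ s ∈ l, pvCnt s ∈ cs) →
    (cs.flatMap (fun c => l.filter (fun s => pvCnt s == c))).Perm l := by
  intro cs
  induction cs with
  | nil =>
    intro _ l hcov
    cases l with
    | nil => simp
    | cons x t => exact absurd (hcov x (by simp)) (by simp)
  | cons c cs' ih =>
    intro hnd l hcov
    rw [List.flatMap_cons]
    have hrest : ∀ c' ∈ cs', (l.filter (fun s => pvCnt s == c')) =
        ((l.filter (fun s => !(pvCnt s == c))).filter (fun s => pvCnt s == c')) := by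
      intro c' hc'
      rw [List.filter_filter]
      refine (List.filter_congr ?_)
      intro s _
      by_cases h : pvCnt s = c'
      · have hne : c' ≠ c := by rintro rfl; exact (List.nodup_cons.mp hnd).1 hc'
        simp [h, hne]
      · simp [h]
    have hflat : cs'.flatMap (fun c' => l.filter (fun s => pvCnt s == c')) =
        cs'.flatMap (fun c' => (l.filter (fun s => !(pvCnt s == c))).filter
          (fun s => pvCnt s == c')) :=
      List.flatMap_congr hrest
    rw [hflat]
    have ih' := ih (List.nodup_cons.mp hnd).2 (l.filter (fun s => !(pvCnt s == c)))
      (by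
        intro s hs
        have hm := List.mem_filter.mp hs
        have hc := hcov s hm.1
        have hne : pvCnt s ≠ c := by simpa using hm.2
        simpa [hne] using hc)
    exact (ih'.append_left (l.filter (fun s => pvCnt s == c))).trans
      (List.filter_append_perm _ l)

theorem apelidos_alt_perm (nomes : List String) : (apelidos_alt nomes).Perm nomes := by
  rw [apelidos_alt_eq]
  have h1 : ((PySem.List.sorted (PySem.Set.ofList (nomes.map pvCnt)) (fun x => x)).flatMap
      (fun c => PySem.List.sorted (nomes.filter (fun s => pvCnt s == c)) (fun x => x))).Perm
      ((PySem.List.sorted (PySem.Set.ofList (nomes.map pvCnt)) (fun x => x)).flatMap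
      (fun c => nomes.filter (fun s => pvCnt s == c))) :=
    List.Perm.flatMap_left _ (fun c _ => PySem.List.sorted_perm _ _ _)
  refine h1.trans (flat_perm _ ?_ nomes ?_)
  · exact ((PySem.List.sorted_perm _ _ _).nodup_iff).mpr (PySem.Set.nodup_ofList _)
  · intro s hs
    rw [PySem.List.mem_sorted, PySem.Set.mem_ofList]
    exact List.mem_map_of_mem hs

theorem apelidos_alt_pairwise (nomes : List String) :
    (apelidos_alt nomes).Pairwise (fun a b => pvKey a ≤ pvKey b) := by
  rw [apelidos_alt_eq, List.flatMap_def, List.pairwise_flatten]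
  constructor
  · intro l' hl'
    obtain ⟨c, _, rfl⟩ := List.mem_map.mp hl'
    refine (PySem.List.sorted_pairwise _ (fun x => x)).imp_of_mem ?_
    intro a b ha hb hle
    have ha' : pvCnt a = c := by
      have := (List.mem_filter.mp ((PySem.List.mem_sorted _ _ _ a).mp ha)).2
      simpa using this
    have hb' : pvCnt b = c := by
      have := (List.mem_filter.mp ((PySem.List.mem_sorted _ _ _ b).mp hb)).2
      simpa using this
    show toLex (pvCnt a, a) ≤ toLex (pvCnt b, b)
    exact Prod.Lex.toLex_le_toLex.mpr (Or.inr ⟨ha'.trans hb'.symm, hle⟩)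
  · rw [List.pairwise_map]
    refine (PySem.List.sorted_ofList_pairwise_lt (nomes.map pvCnt)).imp_of_mem ?_
    intro c c' _ _ hlt x hx y hy
    have hx' : pvCnt x = c := by
      have := (List.mem_filter.mp ((PySem.List.mem_sorted _ _ _ x).mp hx)).2
      simpa using this
    have hy' : pvCnt y = c' := by
      have := (List.mem_filter.mp ((PySem.List.mem_sorted _ _ _ y).mp hy)).2
      simpa using this
    show toLex (pvCnt x, x) ≤ toLex (pvCnt y, y)
    exact le_of_lt (Prod.Lex.toLex_lt_toLex.mpr (Or.inl (by rw [hx', hy']; exact hlt)))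

-- ===== VERDICT (by name: the statement is the Claim_ definition above) =====
theorem apelidos_spec : Claim_equal_apelidos := by
  intro nomes _
  unfold Spec_apelidos
  exact PySem.List.eq_of_perm_of_pairwise_le_of_injective pvKey pvKey_injective
    ((apelidos_perm nomes).trans (apelidos_alt_perm nomes).symm)
    (apelidos_pairwise nomes) (apelidos_alt_pairwise nomes)
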